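-- pv_equiv track=rewrite | github.com/JBoyd-12/TSP-Artificial-Intelligence | Project 6/Partition.py | rankPartitions
-- ===== SOURCE A (Python) =====
-- import operator
--
-- class Fitness:
--     def __init__(self, subset1, subset2):
--         self.subset1 = subset1
--         self.subset2 = subset2
--         self.sum1 = 0
--         self.sum2 = 0
--         self.fitness = 0
--
--     #function that calculates a fitness score based on how close the sum of the two subsets are
--     def individualFitness(self):
--         if (self.fitness == 0):
--             self.sum1 = sum(self.subset1)
--             self.sum2 = sum(self.subset2)
--             self.fitness = abs(self.sum1 - self.sum2)
--         return self.fitness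
--
-- def rankPartitions(population, setOfNumbers):
--     fitnessResults = {}
--     part1 = []
--     part2 = []
--
--     for i in range(0, len(population)):
--         for j in range(0, len(population[i])):
--             if (population[i][j] == 0):
--                 part1.append(setOfNumbers[j])
--             if (population[i][j] == 1):
--                 part2.append(setOfNumbers[j])
--
--         fitnessResults[i] = Fitness(part1, part2).individualFitness()
--         part1.clear()
--         part2.clear()
--
--     return sorted(fitnessResults.items(), key = operator.itemgetter(1), reverse = False) #returns a sorted list with individual ID's associated with their fitness scores
-- ===== SOURCE B (Python) =====
-- def _column_delta(num, ind, j):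
--     if j < len(ind):
--         if ind[j] == 0:
--             return num
--         if ind[j] == 1:
--             return -num
--     return 0
--
-- def rankPartitions(population, setOfNumbers):
--     # column-major sweep: one running signed balance per individual, updated number by number;
--     # numbers past the longest genome cannot be selected, so the sweep stops at that width
--     width = 0
--     for ind in population:
--         width = max(width, len(ind))
--     scores = [0] * len(population)
--     for j, num in enumerate(setOfNumbers[:width]):
--         scores = [s + _column_delta(num, ind, j) for s, ind in zip(scores, population)]
--     return sorted(((i, abs(s)) for i, s in enumerate(scores)), key=lambda t: t[1])
-- ===== Notes on version B (the rewrite author's own statement) =====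
-- stated objective: alternative
-- what changed: B sweeps column-major instead of row-major: it computes the longest genome width, then for each number of setOfNumbers[:width] rebuilds the whole vector of per-individual signed balances (zip of scores with population), takes abs and one stable sort; A builds two subset lists per individual row by row and sums them via a Fitness object.
import Mathlib
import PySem

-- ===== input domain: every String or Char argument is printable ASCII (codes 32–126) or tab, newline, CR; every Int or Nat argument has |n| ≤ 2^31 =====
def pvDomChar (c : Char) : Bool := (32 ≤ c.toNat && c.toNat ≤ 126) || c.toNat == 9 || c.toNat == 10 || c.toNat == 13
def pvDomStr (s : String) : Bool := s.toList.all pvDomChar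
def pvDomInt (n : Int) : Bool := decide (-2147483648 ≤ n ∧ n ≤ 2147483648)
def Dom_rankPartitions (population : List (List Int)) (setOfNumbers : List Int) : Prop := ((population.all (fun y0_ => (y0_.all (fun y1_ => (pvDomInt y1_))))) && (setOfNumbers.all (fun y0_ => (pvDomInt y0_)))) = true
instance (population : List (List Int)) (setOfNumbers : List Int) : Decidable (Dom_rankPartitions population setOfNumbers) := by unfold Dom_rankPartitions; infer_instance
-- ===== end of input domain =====

-- B replaces A's row-major subset-list construction with a column-major sweep that
-- rebuilds a vector of signed balances once per number (alternative decomposition, same cost).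

-- ===== PORT A =====
-- inner loop body: 'if gene == 0: part1.append(set[j])' / 'if gene == 1: part2.append(set[j])'
def pvInnerA (ind setOfNumbers : List Int) (st : List Int × List Int) (j : Int) :
    List Int × List Int :=
  let st1 := if PySem.List.pyGetD ind j 0 = 0 then
      (st.1 ++ [PySem.List.pyGetD setOfNumbers j 0], st.2) else st
  if PySem.List.pyGetD ind j 0 = 1 then
      (st1.1, st1.2 ++ [PySem.List.pyGetD setOfNumbers j 0]) else st1

-- Fitness(part1, part2).individualFitness(): fitness starts at 0 so it computes |sum1 - sum2|
def rankPartitions (population : List (List Int)) (setOfNumbers : List Int) : List (Int × Int) :=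
  let d := (PySem.List.pyRange 0 (PySem.List.len population) 1).foldl
    (fun (d : PySem.Dict Int Int) i =>
      let ind := PySem.List.pyGetD population i []
      let st := (PySem.List.pyRange 0 (PySem.List.len ind) 1).foldl
        (pvInnerA ind setOfNumbers) ([], [])
      d.insert i |st.1.sum - st.2.sum|) PySem.Dict.empty
  PySem.List.sorted d.items (fun p => p.2) false

-- ===== PORT B =====
-- _column_delta(num, ind, j)
def pvDeltaB (num : Int) (ind : List Int) (j : Int) : Int :=
  if j < PySem.List.len ind then
    if PySem.List.pyGetD ind j 0 = 0 then num
    else if PySem.List.pyGetD ind j 0 = 1 then -num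
    else 0
  else 0

def rankPartitions_alt (population : List (List Int)) (setOfNumbers : List Int) : List (Int × Int) :=
  let width := population.foldl (fun w ind => max w (PySem.List.len ind)) 0
  let scores := (PySem.List.enumerate (PySem.List.slice setOfNumbers none (some width)) (0 : Int)).foldl
    (fun (scores : List Int) q =>
      (scores.zip population).map (fun p => p.1 + pvDeltaB q.2 p.2 q.1))
    (List.replicate population.length 0)
  PySem.List.sorted ((PySem.List.enumerate scores (0 : Int)).map (fun p => (p.1, |p.2|)))
    (fun t => t.2) false

-- ===== PRECONDITION & SPEC =====
-- A raises IndexError iff some individual has a 0/1 gene at a position ≥ len(setOfNumbers)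
def Pre_rankPartitions (population : List (List Int)) (setOfNumbers : List Int) : Prop :=
  ∀ ind ∈ population, ∀ g ∈ ind.drop setOfNumbers.length, g ≠ 0 ∧ g ≠ 1
instance (population : List (List Int)) (setOfNumbers : List Int) : Decidable (Pre_rankPartitions population setOfNumbers) := by unfold Pre_rankPartitions; infer_instance
def pvWitness_rankPartitions : List (List Int) × List Int := ([[0, 1, 2], [1, 1, 5]], [4, 7, 9])

def Spec_rankPartitions (population : List (List Int)) (setOfNumbers : List Int) (out : List (Int × Int)) : Prop := out = rankPartitions_alt population setOfNumbers
instance (population : List (List Int)) (setOfNumbers : List Int) (out : List (Int × Int)) : Decidable (Spec_rankPartitions population setOfNumbers out) := by unfold Spec_rankPartitions; infer_instance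

-- ===== CLAIM =====
def Claim_equal_rankPartitions : Prop := ∀ (population : List (List Int)) (setOfNumbers : List Int), Dom_rankPartitions population setOfNumbers → Pre_rankPartitions population setOfNumbers → Spec_rankPartitions population setOfNumbers (rankPartitions population setOfNumbers)

-- ===== LEMMAS AND PROOFS =====

-- signed gene sum of (gene, number) pairs
def pvSSum : List (Int × Int) → Int
  | [] => 0
  | q :: l => (if q.1 = 0 then pvSSum l + q.2 else if q.1 = 1 then pvSSum l - q.2 else pvSSum l)

-- A's inner loop over enumerated genes: difference of the two subset sums
lemma pvInnerA_spec (ind setOfNumbers : List Int) (s : Nat)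
    (h : ∀ g ∈ ind.drop (setOfNumbers.length - s), g ≠ 0 ∧ g ≠ 1)
    (p : List Int × List Int) :
    ((PySem.List.enumerate ind (s : Int)).foldl
        (fun st (q : Int × Int) =>
          let st1 := if q.2 = 0 then (st.1 ++ [PySem.List.pyGetD setOfNumbers q.1 0], st.2) else st
          if q.2 = 1 then (st1.1, st1.2 ++ [PySem.List.pyGetD setOfNumbers q.1 0]) else st1) p).1.sum
      - ((PySem.List.enumerate ind (s : Int)).foldl
        (fun st (q : Int × Int) =>
          let st1 := if q.2 = 0 then (st.1 ++ [PySem.List.pyGetD setOfNumbers q.1 0], st.2) else st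
          if q.2 = 1 then (st1.1, st1.2 ++ [PySem.List.pyGetD setOfNumbers q.1 0]) else st1) p).2.sum
      = (p.1.sum - p.2.sum) + pvSSum (ind.zip (setOfNumbers.drop s)) := by
  induction ind generalizing s p with
  | nil => simp [PySem.List.enumerate_nil, pvSSum]
  | cons g tl ih =>
    rw [PySem.List.enumerate_cons]
    by_cases hs : s < setOfNumbers.length
    · obtain ⟨x, rest, hx⟩ : ∃ x rest, setOfNumbers.drop s = x :: rest := by
        cases hd : setOfNumbers.drop s with
        | nil => exfalso; have := List.drop_eq_nil_iff.mp hd; omega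
        | cons x rest => exact ⟨x, rest, rfl⟩
      have hget : PySem.List.pyGetD setOfNumbers (s : Int) 0 = x := by
        rw [PySem.List.pyGetD_natCast]
        have : setOfNumbers.getD s 0 = (setOfNumbers.drop s).getD 0 0 := by
          simp [List.getD, List.getElem?_drop]
        rw [this, hx]; rfl
      have hrest : setOfNumbers.drop (s + 1) = rest := by
        have h2 : (setOfNumbers.drop s).drop 1 = setOfNumbers.drop (s + 1) := by
          rw [List.drop_drop]
        rw [← h2, hx]; rfl
      have h' : ∀ g' ∈ tl.drop (setOfNumbers.length - (s + 1)), g' ≠ 0 ∧ g' ≠ 1 := by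
        intro g' hg'
        apply h
        have hlen : setOfNumbers.length - s = (setOfNumbers.length - (s + 1)) + 1 := by omega
        rw [hlen, List.drop_succ_cons] at *
        exact hg'
      have hcast : (s : Int) + 1 = ((s + 1 : Nat) : Int) := by push_cast; ring
      rw [List.foldl_cons, hcast, ih (s + 1) h', hx, hrest, List.zip_cons_cons]
      clear ih h h'
      simp only [pvSSum, hget]
      split_ifs <;> simp_all <;> ring
    · have hg : g ≠ 0 ∧ g ≠ 1 := by
        apply h
        have : setOfNumbers.length - s = 0 := by omega
        rw [this]
        simp
      have hzip : (g :: tl).zip (setOfNumbers.drop s) = [] := by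
        have : setOfNumbers.drop s = [] := by
          apply List.drop_eq_nil_iff.mpr; omega
        rw [this, List.zip_nil_right]
      have h' : ∀ g' ∈ tl.drop (setOfNumbers.length - (s + 1)), g' ≠ 0 ∧ g' ≠ 1 := by
        intro g' hg'
        have h1 : setOfNumbers.length - (s + 1) = 0 := by omega
        have h2 : setOfNumbers.length - s = 0 := by omega
        rw [h1] at hg'
        apply h
        rw [h2]
        simp only [List.drop_zero] at *
        exact List.mem_cons_of_mem _ hg'
      have hzip' : tl.zip (setOfNumbers.drop (s + 1)) = [] := by
        have : setOfNumbers.drop (s + 1) = [] := by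
          apply List.drop_eq_nil_iff.mpr; omega
        rw [this, List.zip_nil_right]
      have hcast : (s : Int) + 1 = ((s + 1 : Nat) : Int) := by push_cast; ring
      rw [List.foldl_cons, hcast, ih (s + 1) h', hzip, hzip']
      clear ih h h'
      simp [pvSSum, hg.1, hg.2]

lemma pvZipAddZero : ∀ (a : List Int) (b : List (List Int)), a.length = b.length →
    (a.zip b).map (fun p => p.1 + (0 : Int)) = a := by
  intro a
  induction a with
  | nil => intro b _; simp
  | cons x a ih =>
    intro b h
    cases b with
    | nil => simp at h
    | cons y b =>
      have h' : a.length = b.length := by simpa using h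
      simp only [List.zip_cons_cons, List.map_cons, ih b h']
      simp

lemma pvFoldShift (ind : List Int) : ∀ (l : List (Int × Int)) (a : Int),
    l.foldl (fun acc q => acc + pvDeltaB q.2 ind q.1) a
      = a + l.foldl (fun acc q => acc + pvDeltaB q.2 ind q.1) 0 := by
  intro l
  induction l with
  | nil => intro a; simp
  | cons q l ih =>
    intro a
    rw [List.foldl_cons, List.foldl_cons, ih (a + pvDeltaB q.2 ind q.1),
        ih (0 + pvDeltaB q.2 ind q.1)]
    ring

-- re-zipping a mapped zip with the same right list
lemma pvZipMapZip (f : Int × List Int → Int) :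
    ∀ (a : List Int) (b : List (List Int)),
    ((a.zip b).map f).zip b = (a.zip b).map (fun p => (f p, p.2)) := by
  intro a
  induction a with
  | nil => intro b; simp
  | cons x a ih =>
    intro b
    cases b with
    | nil => simp
    | cons y b => simp [ih]

-- the column-major fold distributes into one per-row fold
lemma pvColFold (pop : List (List Int)) :
    ∀ (pairs : List (Int × Int)) (scores : List Int), scores.length = pop.length →
    pairs.foldl
        (fun (sc : List Int) q => (sc.zip pop).map (fun p => p.1 + pvDeltaB q.2 p.2 q.1)) scores
      = (scores.zip pop).map
          (fun p => p.1 + pairs.foldl (fun a q => a + pvDeltaB q.2 p.2 q.1) 0) := by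
  intro pairs
  induction pairs with
  | nil =>
    intro scores h
    simp only [List.foldl_nil]
    rw [pvZipAddZero scores pop h]
  | cons q pairs ih =>
    intro scores h
    rw [List.foldl_cons]
    rw [ih _ (by simp [h])]
    rw [pvZipMapZip, List.map_map]
    apply List.map_congr_left
    intro p _
    simp only [Function.comp, List.foldl_cons]
    rw [pvFoldShift p.2 pairs (0 + pvDeltaB q.2 p.2 q.1)]
    ring

lemma pvReplicateZip : ∀ (pop : List (List Int)),
    (List.replicate pop.length (0 : Int)).zip pop = pop.map (fun ind => ((0 : Int), ind)) := by
  intro pop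
  induction pop with
  | nil => simp
  | cons ind pop ih => simp [List.replicate_succ, ih]

-- per-row: the column-major contributions sum to the signed gene sum
lemma pvRowSum (ind : List Int) :
    ∀ (set : List Int) (s : Nat) (a : Int),
    (PySem.List.enumerate set (s : Int)).foldl (fun a q => a + pvDeltaB q.2 ind q.1) a
      = a + pvSSum ((ind.drop s).zip set) := by
  intro set
  induction set with
  | nil => intro s a; simp [PySem.List.enumerate_nil, pvSSum]
  | cons x rest ih =>
    intro s a
    rw [PySem.List.enumerate_cons, List.foldl_cons]
    have hcast : (s : Int) + 1 = ((s + 1 : Nat) : Int) := by push_cast; ring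
    rw [hcast, ih (s + 1)]
    have hlen : PySem.List.len ind = (ind.length : Int) := by
      simp [PySem.List.len_eq]
    by_cases hs : s < ind.length
    · obtain ⟨g, tl, hg⟩ : ∃ g tl, ind.drop s = g :: tl := by
        cases hd : ind.drop s with
        | nil => exfalso; have := List.drop_eq_nil_iff.mp hd; omega
        | cons g tl => exact ⟨g, tl, rfl⟩
      have hget : PySem.List.pyGetD ind (s : Int) 0 = g := by
        rw [PySem.List.pyGetD_natCast]
        have : ind.getD s 0 = (ind.drop s).getD 0 0 := by
          simp [List.getD, List.getElem?_drop]
        rw [this, hg]; rfl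
      have htl : ind.drop (s + 1) = tl := by
        have h2 : (ind.drop s).drop 1 = ind.drop (s + 1) := by rw [List.drop_drop]
        rw [← h2, hg]; rfl
      have hlt : ((s : Int) < PySem.List.len ind) := by rw [hlen]; exact_mod_cast hs
      rw [hg, htl, List.zip_cons_cons]
      simp only [pvDeltaB, hget, if_pos hlt, pvSSum]
      split_ifs <;> ring
    · have hd1 : ind.drop s = [] := List.drop_eq_nil_iff.mpr (by omega)
      have hd2 : ind.drop (s + 1) = [] := List.drop_eq_nil_iff.mpr (by omega)
      rw [hd1, hd2]
      simp [pvDeltaB, pvSSum, hs]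

lemma pvEnumMap {α β : Type} (f : α → β) :
    ∀ (l : List α) (s : Int),
    PySem.List.enumerate (l.map f) s = (PySem.List.enumerate l s).map (fun p => (p.1, f p.2)) := by
  intro l
  induction l with
  | nil => intro s; simp [PySem.List.enumerate_nil]
  | cons x l ih => intro s; simp [PySem.List.enumerate_cons, ih]

-- the width fold over Int is the cast of the same fold over Nat
lemma pvWidthCast (pop : List (List Int)) :
    ∀ (a : Nat), pop.foldl (fun w ind => max w (PySem.List.len ind)) (a : Int)
      = ((pop.foldl (fun w ind => max w ind.length) a : Nat) : Int) := by
  induction pop with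
  | nil => intro a; simp
  | cons ind pop ih =>
    intro a
    rw [List.foldl_cons, List.foldl_cons]
    have : max (a : Int) (PySem.List.len ind) = ((max a ind.length : Nat) : Int) := by
      simp [PySem.List.len_eq, Nat.cast_max]
    rw [this, ih]

lemma pvFoldMaxGe (pop : List (List Int)) :
    ∀ (a : Nat), a ≤ pop.foldl (fun w ind => max w ind.length) a := by
  induction pop with
  | nil => intro a; simp
  | cons ind pop ih =>
    intro a
    rw [List.foldl_cons]
    exact le_trans (le_max_left a ind.length) (ih _)

lemma pvWidthMem (pop : List (List Int)) :
    ∀ (a : Nat) (ind : List Int), ind ∈ pop →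
      ind.length ≤ pop.foldl (fun w i => max w i.length) a := by
  induction pop with
  | nil => intro a ind h; simp at h
  | cons i0 pop ih =>
    intro a ind h
    rw [List.foldl_cons]
    rcases List.mem_cons.mp h with h | h
    · subst h
      exact le_trans (le_max_right a ind.length) (pvFoldMaxGe pop _)
    · exact ih _ ind h

lemma pvZipTake : ∀ (ind set : List Int) (W : Nat), ind.length ≤ W →
    ind.zip (set.take W) = ind.zip set := by
  intro ind
  induction ind with
  | nil => intro set W _; simp
  | cons g tl ih =>
    intro set W h
    cases W with
    | zero => simp at h
    | succ W =>
      cases set with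
      | nil => simp
      | cons x set =>
        rw [List.take_succ_cons, List.zip_cons_cons, List.zip_cons_cons,
            ih set W (by simpa using h)]

-- the main equality under Pre_
lemma pvRank_eq (population : List (List Int)) (setOfNumbers : List Int)
    (hpre : Pre_rankPartitions population setOfNumbers) :
    rankPartitions population setOfNumbers = rankPartitions_alt population setOfNumbers := by
  unfold rankPartitions rankPartitions_alt
  have hitems := PySem.Dict.items_foldl_insert_fresh
    (l := PySem.List.pyRange 0 (PySem.List.len population) 1)
    (k := fun i => i)
    (v := fun i =>
      let ind := PySem.List.pyGetD population i []
      let st := (PySem.List.pyRange 0 (PySem.List.len ind) 1).foldl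
        (pvInnerA ind setOfNumbers) ([], [])
      |st.1.sum - st.2.sum|)
    (d := PySem.Dict.empty)
    (by intro a _; simp [PySem.Dict.contains_empty])
    (by simpa using PySem.List.nodup_pyRange_one 0 (PySem.List.len population))
  dsimp only
  rw [hitems]
  congr 1
  -- B's width and scores list
  have hW : population.foldl (fun w ind => max w (PySem.List.len ind)) 0
      = ((population.foldl (fun w ind => max w ind.length) 0 : Nat) : Int) := by
    exact_mod_cast pvWidthCast population 0
  set W : Nat := population.foldl (fun w ind => max w ind.length) 0 with hWdef
  rw [hW, PySem.List.slice_to_natCast]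
  rw [pvColFold population _ _ (by simp)]
  rw [pvReplicateZip, List.map_map]
  rw [pvEnumMap]
  rw [PySem.List.enumerate_eq_map_pyRange population ([] : List Int)]
  simp only [PySem.List.len_eq, List.map_map]
  apply List.map_congr_left
  intro j hj
  have hj' := (PySem.List.mem_pyRange_one).mp hj
  set ind := PySem.List.pyGetD population j [] with hind
  have hmem : ind ∈ population := by
    apply PySem.List.pyGetD_mem
    constructor <;> omega
  -- A's per-individual score
  have hA :
      ((PySem.List.pyRange 0 (PySem.List.len ind) 1).foldl
          (pvInnerA ind setOfNumbers) ([], [])).1.sum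
        - ((PySem.List.pyRange 0 (PySem.List.len ind) 1).foldl
          (pvInnerA ind setOfNumbers) ([], [])).2.sum
        = pvSSum (ind.zip setOfNumbers) := by
    have hmap := PySem.List.enumerate_eq_map_pyRange ind (0 : Int)
    have hfold :
        (PySem.List.pyRange 0 (PySem.List.len ind) 1).foldl (pvInnerA ind setOfNumbers) ([], [])
          = (PySem.List.enumerate ind (0 : Int)).foldl
              (fun st (q : Int × Int) =>
                let st1 := if q.2 = 0 then (st.1 ++ [PySem.List.pyGetD setOfNumbers q.1 0], st.2) else st
                if q.2 = 1 then (st1.1, st1.2 ++ [PySem.List.pyGetD setOfNumbers q.1 0]) else st1)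
              ([], []) := by
      rw [hmap, List.foldl_map]
      rfl
    have h0 : ∀ g ∈ ind.drop (setOfNumbers.length - 0), g ≠ 0 ∧ g ≠ 1 := by
      simpa using hpre _ hmem
    have := pvInnerA_spec ind setOfNumbers 0 h0 ([], [])
    rw [(by rfl : ((0 : Nat) : Int) = 0)] at this
    rw [hfold, this]
    simp
  -- B's per-individual score
  have hB := pvRowSum ind (setOfNumbers.take W) 0 0
  rw [(by rfl : ((0 : Nat) : Int) = 0)] at hB
  simp only [List.drop_zero] at hB
  rw [pvZipTake ind setOfNumbers W (pvWidthMem population 0 ind hmem)] at hB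
  simp only [PySem.List.len_eq] at hA ⊢
  simp only [Function.comp, ← hind]
  rw [hA, hB]
  simp

-- ===== VERDICT =====
theorem rankPartitions_spec : Claim_equal_rankPartitions := by
  intro population setOfNumbers _ hpre
  unfold Spec_rankPartitions
  exact pvRank_eq population setOfNumbers hpre
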